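-- pv_equiv track=rewrite | github.com/innaSigal/QuoteProcessTracker | main.py | find_relation_col
-- ===== SOURCE A (Python) =====
-- def find_relation_col(columns_meta, title_guess: str) -> dict:
--     tnorm = (title_guess or "").strip().casefold()
--     for c in columns_meta or []:
--         if (c.get("type") == "board_relation") and ((c.get("title") or "").strip().casefold() == tnorm):
--             return c
--     for c in columns_meta or []:
--         if c.get("type") == "board_relation":
--             return c
--     return None
-- ===== SOURCE B (Python) =====
-- def find_relation_col(columns_meta, title_guess: str) -> dict:
--     tnorm = (title_guess or "").strip().casefold()
--     first_br = None
--     for c in columns_meta or []: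
--         if c.get("type") == "board_relation":
--             if (c.get("title") or "").strip().casefold() == tnorm:
--                 return c
--             if first_br is None:
--                 first_br = c
--     return first_br
-- ===== Notes on version B (the rewrite author's own statement) =====
-- stated objective: simpler
-- what changed: A's two sequential scans over columns_meta are collapsed into a single pass that keeps the first board_relation column in an accumulator and returns early on a title match.
import Mathlib
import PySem

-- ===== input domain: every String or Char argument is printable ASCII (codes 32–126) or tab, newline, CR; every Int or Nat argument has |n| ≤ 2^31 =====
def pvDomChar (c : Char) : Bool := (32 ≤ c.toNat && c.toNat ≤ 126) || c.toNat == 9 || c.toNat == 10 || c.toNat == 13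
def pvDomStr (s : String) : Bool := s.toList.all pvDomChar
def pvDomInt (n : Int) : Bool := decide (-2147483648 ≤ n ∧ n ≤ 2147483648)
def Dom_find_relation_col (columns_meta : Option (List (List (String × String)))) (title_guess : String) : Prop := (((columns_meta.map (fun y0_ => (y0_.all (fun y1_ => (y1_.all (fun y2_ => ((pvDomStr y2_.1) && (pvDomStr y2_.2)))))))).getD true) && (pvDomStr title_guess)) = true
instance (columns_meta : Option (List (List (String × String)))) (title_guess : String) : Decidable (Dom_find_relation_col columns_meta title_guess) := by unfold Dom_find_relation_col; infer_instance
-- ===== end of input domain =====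

-- B collapses A's two sequential scans into one pass with a 'first board_relation' accumulator (objective: simpler).

-- ===== PORT A =====
-- c.get(k) on the association list (first match), Python dict.get semantics
def pvGetKey (c : List (String × String)) (k : String) : Option String :=
  (c.find? (fun p => p.1 == k)).map (·.2)

-- (s or "").strip().casefold(); casefold = lower on the ASCII domain (exact there)
def pvNorm (s : String) : String :=
  PySem.Str.lower (PySem.Str.strip s)

def find_relation_col (columns_meta : Option (List (List (String × String)))) (title_guess : String) : Option (List (String × String)) :=
  let tnorm := pvNorm title_guess
  -- first loop: board_relation with matching normalized title
  match (columns_meta.getD []).find? (fun c =>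
      pvGetKey c "type" == some "board_relation" &&
      pvNorm ((pvGetKey c "title").getD "") == tnorm) with
  | some c => some c
  | none =>
    -- second loop: first board_relation
    (columns_meta.getD []).find? (fun c => pvGetKey c "type" == some "board_relation")

-- ===== PORT B =====
-- one pass, carrying first_br
def pvScan (tnorm : String) : List (List (String × String)) → Option (List (String × String)) → Option (List (String × String))
  | [], first_br => first_br
  | c :: rest, first_br =>
    if pvGetKey c "type" == some "board_relation" then
      if pvNorm ((pvGetKey c "title").getD "") == tnorm then some c
      else pvScan tnorm rest (first_br.or (some c))
    else pvScan tnorm rest first_br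

def find_relation_col_alt (columns_meta : Option (List (List (String × String)))) (title_guess : String) : Option (List (String × String)) :=
  pvScan (pvNorm title_guess) (columns_meta.getD []) none

-- ===== PRECONDITION & SPEC =====
def Spec_find_relation_col (columns_meta : Option (List (List (String × String)))) (title_guess : String) (out : Option (List (String × String))) : Prop := out = find_relation_col_alt columns_meta title_guess
instance (columns_meta : Option (List (List (String × String)))) (title_guess : String) (out : Option (List (String × String))) : Decidable (Spec_find_relation_col columns_meta title_guess out) := by unfold Spec_find_relation_col; infer_instance

-- ===== CLAIM (what is proved, stated in full; the proofs are below) =====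
def Claim_equal_find_relation_col : Prop := ∀ (columns_meta : Option (List (List (String × String)))) (title_guess : String), Dom_find_relation_col columns_meta title_guess → Spec_find_relation_col columns_meta title_guess (find_relation_col columns_meta title_guess)

-- ===== LEMMAS AND PROOFS =====
-- invariant of B's single pass: it equals "first title match, else accumulator-or-first board_relation"
theorem pvScan_eq (tnorm : String) (cols : List (List (String × String)))
    (acc : Option (List (String × String))) :
    pvScan tnorm cols acc =
      match cols.find? (fun c =>
          pvGetKey c "type" == some "board_relation" &&
          pvNorm ((pvGetKey c "title").getD "") == tnorm) with
      | some c => some c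
      | none => acc.or (cols.find? (fun c => pvGetKey c "type" == some "board_relation")) := by
  induction cols generalizing acc with
  | nil => simp [pvScan]
  | cons c rest ih =>
    by_cases hb : (pvGetKey c "type" == some "board_relation") = true
    · by_cases ht : (pvNorm ((pvGetKey c "title").getD "") == tnorm) = true
      · simp [pvScan, hb, ht, List.find?]
      · rw [Bool.not_eq_true] at ht
        simp only [pvScan, hb, ht, if_true, List.find?, Bool.and_false]
        rw [ih]
        cases h : rest.find? (fun c =>
            pvGetKey c "type" == some "board_relation" &&
            pvNorm ((pvGetKey c "title").getD "") == tnorm) <;>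
          cases acc <;> simp [Option.or]
    · rw [Bool.not_eq_true] at hb
      simp only [pvScan, hb, List.find?, Bool.false_and]
      exact ih acc
  
theorem find_relation_col_spec : Claim_equal_find_relation_col := by
  intro columns_meta title_guess _
  unfold Spec_find_relation_col find_relation_col find_relation_col_alt
  rw [pvScan_eq]
  cases h : (columns_meta.getD []).find? (fun c =>
      pvGetKey c "type" == some "board_relation" &&
      pvNorm ((pvGetKey c "title").getD "") == pvNorm title_guess) <;> simp [h, Option.or]
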